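-- pv_equiv track=rewrite | github.com/pypi-data/pypi-mirror-121 | packages/text-reuse-retrieve/text-reuse-retrieve-0.1.18.tar.gz/text-reuse-retrieve-0.1.18/src/retrieve/methods/align/align.py | get_alignment_ranges
-- ===== SOURCE A (Python) =====
-- import itertools
--
-- GAP_SYM = -1
--
-- def get_alignment_ranges(a1, a2, gap_sym=GAP_SYM):
--
--     def _get_alignment_ranges(alignment, gap_sym):
--         ranges = []
--         for key, group in itertools.groupby(alignment, lambda item: item == gap_sym):
--             if key:
--                 continue
--             group = list(group)
--             if len(group) > 1:
--                 start, *_, end = group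
--             else:
--                 start = end = group[0]
--             ranges.append((start, end + 1))
--         return ranges
--
--     return _get_alignment_ranges(a1, gap_sym), _get_alignment_ranges(a2, gap_sym)
-- ===== SOURCE B (Python) =====
-- GAP_SYM = -1
--
-- def get_alignment_ranges(a1, a2, gap_sym=GAP_SYM):
--
--     def _ranges(a, gap):
--         # boundary detection: a position starts a run iff its left neighbour
--         # (virtual gap before index 0) is a gap, and ends one iff its right
--         # neighbour (virtual gap after the end) is a gap; pair them up.
--         prevs = [gap] + a[:-1]
--         nexts = a[1:] + [gap]
--         starts = [x for p, x in zip(prevs, a) if x != gap and p == gap]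
--         ends = [x for x, nx in zip(a, nexts) if x != gap and nx == gap]
--         return [(s, e + 1) for s, e in zip(starts, ends)]
--
--     return _ranges(a1, gap_sym), _ranges(a2, gap_sym)
-- ===== Notes on version B (the rewrite author's own statement) =====
-- stated objective: alternative
-- what changed: Replaces the run-grouping scan (itertools.groupby over runs, unpacking each run's first/last element) by staged boundary detection: zip the alignment with its left-shifted and right-shifted copies (virtual gaps at both ends), extract the list of run-start values and the list of run-end values independently, and zip those two lists into (start, end+1) ranges; correct because runs of non-gaps alternate starts and ends in order, so the k-th start pairs with the k-th end.
import Mathlib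
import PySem

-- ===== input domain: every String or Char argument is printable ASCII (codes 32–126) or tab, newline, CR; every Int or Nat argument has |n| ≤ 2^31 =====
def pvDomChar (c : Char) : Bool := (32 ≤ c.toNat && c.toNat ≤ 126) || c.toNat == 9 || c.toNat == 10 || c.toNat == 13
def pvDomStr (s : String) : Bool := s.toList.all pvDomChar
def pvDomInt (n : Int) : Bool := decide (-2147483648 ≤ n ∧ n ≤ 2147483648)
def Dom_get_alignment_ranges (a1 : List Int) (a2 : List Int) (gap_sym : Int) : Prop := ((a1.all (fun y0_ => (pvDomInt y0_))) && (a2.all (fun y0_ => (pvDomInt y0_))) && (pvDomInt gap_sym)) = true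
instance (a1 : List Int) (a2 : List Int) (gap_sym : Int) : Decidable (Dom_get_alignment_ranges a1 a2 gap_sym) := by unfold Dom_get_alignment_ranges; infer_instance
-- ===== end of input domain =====

-- B replaces itertools.groupby's run grouping by staged boundary detection: it
-- zips the alignment with its left- and right-shifted copies to extract the list
-- of run starts and the list of run ends independently, then pairs them up.

-- ===== PORT A =====
-- itertools.groupby(alignment, lambda item: item == gap_sym): maximal runs of
-- equal key, in order, each tagged with its key (exact for this use: the group
-- is materialised with list(group) before the iterator advances).
def pyGroupBy (gap : Int) : List Int → List (Bool × List Int)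
  | [] => []
  | x :: xs =>
    match pyGroupBy gap xs with
    | [] => [(x == gap, [x])]
    | (k, g) :: rest =>
      if (x == gap) == k then (k, x :: g) :: rest
      else (x == gap, [x]) :: (k, g) :: rest

-- the range appended for one non-gap group (A's len>1 branch)
def pvRangeOfGroup (g : List Int) : Int × Int :=
  if g.length > 1 then (g.headD 0, g.getLastD 0 + 1)
  else (g.headD 0, g.headD 0 + 1)

-- A's inner loop: skip gap groups ('if key: continue'), append the range otherwise
def pvARanges (alignment : List Int) (gap : Int) : List (Int × Int) :=
  (pyGroupBy gap alignment).foldl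
    (fun acc kg => if !kg.1 then acc ++ [pvRangeOfGroup kg.2] else acc) []

def get_alignment_ranges (a1 : List Int) (a2 : List Int) (gap_sym : Int) : (List (Int × Int)) × (List (Int × Int)) :=
  (pvARanges a1 gap_sym, pvARanges a2 gap_sym)

-- ===== PORT B =====
-- Source B: prevs = [gap] + a[:-1]  (a[:-1] is exactly List.dropLast),
--       nexts = a[1:] + [gap]   (a[1:] is exactly List.drop 1);
-- starts/ends are list comprehensions over zip = filter + map.
def pvStarts (a : List Int) (gap : Int) : List Int :=
  (((gap :: a.dropLast).zip a).filter (fun px => (px.2 != gap) && (px.1 == gap))).map (fun px => px.2)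

def pvEnds (a : List Int) (gap : Int) : List Int :=
  ((a.zip (a.drop 1 ++ [gap])).filter (fun xn => (xn.1 != gap) && (xn.2 == gap))).map (fun xn => xn.1)

def pvBRanges (a : List Int) (gap : Int) : List (Int × Int) :=
  ((pvStarts a gap).zip (pvEnds a gap)).map (fun se => (se.1, se.2 + 1))

def get_alignment_ranges_alt (a1 : List Int) (a2 : List Int) (gap_sym : Int) : (List (Int × Int)) × (List (Int × Int)) :=
  (pvBRanges a1 gap_sym, pvBRanges a2 gap_sym)

-- ===== PRECONDITION & SPEC =====
def Spec_get_alignment_ranges (a1 : List Int) (a2 : List Int) (gap_sym : Int) (out : (List (Int × Int)) × (List (Int × Int))) : Prop := out = get_alignment_ranges_alt a1 a2 gap_sym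
instance (a1 : List Int) (a2 : List Int) (gap_sym : Int) (out : (List (Int × Int)) × (List (Int × Int))) : Decidable (Spec_get_alignment_ranges a1 a2 gap_sym out) := by unfold Spec_get_alignment_ranges; infer_instance

-- ===== CLAIM (what is proved, stated in full; the proofs are below) =====
def Claim_equal_get_alignment_ranges : Prop := ∀ (a1 : List Int) (a2 : List Int) (gap_sym : Int), Dom_get_alignment_ranges a1 a2 gap_sym → Spec_get_alignment_ranges a1 a2 gap_sym (get_alignment_ranges a1 a2 gap_sym)

-- ===== LEMMAS AND PROOFS =====

-- common characterisation: a single left-to-right run scan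
def specLoop (gap : Int) (st : Option (Int × Int)) : List Int → List (Int × Int)
  | [] =>
    match st with
    | none => []
    | some (s, p) => [(s, p + 1)]
  | x :: xs =>
    if x == gap then
      match st with
      | none => specLoop gap none xs
      | some (s, p) => (s, p + 1) :: specLoop gap none xs
    else
      match st with
      | none => specLoop gap (some (x, x)) xs
      | some (s, _) => specLoop gap (some (s, x)) xs

-- ---- A-side: A's groupby fold equals specLoop ----

-- closed form of A's fold over the groups
def pvF (gs : List (Bool × List Int)) : List (Int × Int) :=
  (gs.filter (fun kg => !kg.1)).map (fun kg => pvRangeOfGroup kg.2)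

lemma aRanges_eq_F (alignment : List Int) (gap : Int) :
    pvARanges alignment gap = pvF (pyGroupBy gap alignment) := by
  unfold pvARanges pvF
  simpa using PySem.List.foldl_append_if (fun kg => !kg.1) (fun kg => pvRangeOfGroup kg.2)
    (pyGroupBy gap alignment) []

-- what A produces from the groups when the scan is mid-run with state (s, p)
def scaseG (s p : Int) : List (Bool × List Int) → List (Int × Int)
  | (false, g) :: rest => (s, g.getLastD p + 1) :: pvF rest
  | gs => (s, p + 1) :: pvF gs

def scase (gap s p : Int) (xs : List Int) : List (Int × Int) :=
  scaseG s p (pyGroupBy gap xs)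

lemma rangeOfGroup_cons (x : Int) (g : List Int) :
    pvRangeOfGroup (x :: g) = (x, g.getLastD x + 1) := by
  cases g with
  | nil => simp [pvRangeOfGroup]
  | cons y g' =>
    unfold pvRangeOfGroup
    rw [if_pos (by simp), List.getLastD_cons, List.getLastD_cons]
    rfl

lemma getLastD_cons' (x : Int) (g : List Int) (d : Int) :
    (x :: g).getLast?.getD d = g.getLast?.getD x := by
  induction g generalizing x d with
  | nil => rfl
  | cons y g' ih => rw [List.getLast?_cons_cons, ih y d, ih y x]

lemma scaseG_nil (s p : Int) : scaseG s p [] = [(s, p + 1)] := rfl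

lemma scaseG_true (s p : Int) (g : List Int) (rest : List (Bool × List Int)) :
    scaseG s p ((true, g) :: rest) = (s, p + 1) :: pvF ((true, g) :: rest) := rfl

lemma scaseG_false (s p : Int) (g : List Int) (rest : List (Bool × List Int)) :
    scaseG s p ((false, g) :: rest) = (s, g.getLastD p + 1) :: pvF rest := rfl

lemma main_lemma (gap : Int) : ∀ xs : List Int,
    pvF (pyGroupBy gap xs) = specLoop gap none xs ∧
    ∀ s p : Int, scase gap s p xs = specLoop gap (some (s, p)) xs := by
  intro xs
  induction xs with
  | nil =>
    exact ⟨by simp [pyGroupBy, pvF, specLoop],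
      fun s p => by simp [scase, scaseG, pyGroupBy, pvF, specLoop]⟩
  | cons x xs ih =>
    obtain ⟨ih1, ih2⟩ := ih
    by_cases hx : x == gap
    · have e1 : specLoop gap none (x :: xs) = specLoop gap none xs := by simp [specLoop, hx]
      have e2 : ∀ s p : Int, specLoop gap (some (s, p)) (x :: xs)
          = (s, p + 1) :: specLoop gap none xs := by intro s p; simp [specLoop, hx]
      cases hG : pyGroupBy gap xs with
      | nil =>
        refine ⟨?_, fun s p => ?_⟩
        · rw [e1, ← ih1, hG]; simp [pyGroupBy, hG, hx, pvF]
        · rw [e2, ← ih1, hG]; simp [scase, scaseG_true, pyGroupBy, hG, hx, pvF]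
      | cons kg rest =>
        obtain ⟨k, g⟩ := kg
        cases k with
        | true =>
          refine ⟨?_, fun s p => ?_⟩
          · rw [e1, ← ih1, hG]; simp [pyGroupBy, hG, hx, pvF]
          · rw [e2, ← ih1, hG]; simp [scase, scaseG_true, pyGroupBy, hG, hx, pvF]
        | false =>
          refine ⟨?_, fun s p => ?_⟩
          · rw [e1, ← ih1, hG]; simp [pyGroupBy, hG, hx, pvF]
          · rw [e2, ← ih1, hG]; simp [scase, scaseG_true, pyGroupBy, hG, hx, pvF]
    · have e1 : specLoop gap none (x :: xs) = specLoop gap (some (x, x)) xs := by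
        simp [specLoop, hx]
      have e2 : ∀ s p : Int, specLoop gap (some (s, p)) (x :: xs)
          = specLoop gap (some (s, x)) xs := by intro s p; simp [specLoop, hx]
      cases hG : pyGroupBy gap xs with
      | nil =>
        refine ⟨?_, fun s p => ?_⟩
        · rw [e1, ← ih2]
          simp [scase, scaseG_nil, pyGroupBy, hG, hx, pvF, rangeOfGroup_cons]
        · rw [e2, ← ih2]
          simp [scase, scaseG_nil, scaseG_false, pyGroupBy, hG, hx, pvF]
      | cons kg rest =>
        obtain ⟨k, g⟩ := kg
        cases k with
        | true =>
          refine ⟨?_, fun s p => ?_⟩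
          · rw [e1, ← ih2]
            simp [scase, scaseG_true, pyGroupBy, hG, hx, pvF, rangeOfGroup_cons]
          · rw [e2, ← ih2]
            simp [scase, scaseG_true, scaseG_false, pyGroupBy, hG, hx, pvF]
        | false =>
          refine ⟨?_, fun s p => ?_⟩
          · rw [e1, ← ih2]
            simp [scase, scaseG_false, pyGroupBy, hG, hx, pvF, rangeOfGroup_cons]
          · rw [e2, ← ih2]
            simp [scase, scaseG_false, pyGroupBy, hG, hx, pvF, getLastD_cons']

-- ---- B-side: the start and end lists in recursive form ----

-- start values, parametrised by whether the previous element was a gap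
def sList (gap : Int) (pg : Bool) : List Int → List Int
  | [] => []
  | x :: xs => (if (x != gap) && pg then [x] else []) ++ sList gap (x == gap) xs

-- end values (lookahead: next element, virtual gap after the end)
def eList (gap : Int) : List Int → List Int
  | [] => []
  | x :: xs => (if (x != gap) && (xs.headD gap == gap) then [x] else []) ++ eList gap xs

lemma starts_rec (gap : Int) : ∀ (a : List Int) (p : Int),
    (((p :: a.dropLast).zip a).filter (fun px => (px.2 != gap) && (px.1 == gap))).map
        (fun px => px.2)
      = sList gap (p == gap) a := by
  intro a
  induction a with
  | nil => intro p; simp [sList]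
  | cons x xs ih =>
    intro p
    cases xs with
    | nil =>
      by_cases h1 : x = gap <;> by_cases h2 : p = gap <;>
        simp [sList, List.filter, h1, h2]
    | cons y ys =>
      rw [List.dropLast_cons₂]
      have hz : ((p :: x :: (y :: ys).dropLast).zip (x :: y :: ys))
          = (p, x) :: ((x :: (y :: ys).dropLast).zip (y :: ys)) := rfl
      rw [hz, List.filter_cons]
      by_cases hc : ((x != gap) && (p == gap)) = true
      · rw [if_pos hc, List.map_cons, ih x]
        simp [sList, hc]
      · rw [if_neg hc, ih x]
        simp [sList, hc]

lemma ends_rec (gap : Int) : ∀ (a : List Int),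
    ((a.zip (a.drop 1 ++ [gap])).filter (fun xn => (xn.1 != gap) && (xn.2 == gap))).map
        (fun xn => xn.1)
      = eList gap a := by
  intro a
  induction a with
  | nil => simp [eList]
  | cons x xs ih =>
    cases xs with
    | nil => by_cases h1 : x = gap <;> simp [eList, List.filter, h1]
    | cons y ys =>
      have hz : ((x :: y :: ys).zip ((x :: y :: ys).drop 1 ++ [gap]))
          = (x, y) :: ((y :: ys).zip ((y :: ys).drop 1 ++ [gap])) := rfl
      rw [hz, List.filter_cons]
      by_cases hc : ((x != gap) && (y == gap)) = true
      · rw [if_pos hc, List.map_cons, ih]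
        simp [eList, hc]
      · rw [if_neg hc, ih]
        simp [eList, hc]

lemma b_main (gap : Int) : ∀ a : List Int,
    (((sList gap true a).zip (eList gap a)).map (fun se => (se.1, se.2 + 1))
        = specLoop gap none a) ∧
    (∀ s p : Int, ¬ p = gap →
      (((s :: sList gap false a).zip
          ((if (a.headD gap == gap) then [p] else []) ++ eList gap a)).map
            (fun se => (se.1, se.2 + 1))
        = specLoop gap (some (s, p)) a)) := by
  intro a
  induction a with
  | nil =>
    refine ⟨by simp [sList, eList, specLoop], fun s p _ => ?_⟩
    simp [sList, eList, specLoop]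
  | cons x xs ih =>
    obtain ⟨ih1, ih2⟩ := ih
    by_cases hx : x = gap
    · refine ⟨?_, fun s p hp => ?_⟩
      · simp only [sList, eList, hx, specLoop]
        simpa using ih1
      · simp only [sList, eList, hx, specLoop, List.headD_cons]
        simpa using ih1
    · have hxb : (x == gap) = false := by simp [hx]
      refine ⟨?_, fun s p hp => ?_⟩
      · simp only [sList, eList, hxb, specLoop]
        have := ih2 x x hx
        simpa [hx] using this
      · simp only [sList, eList, hxb, specLoop, List.headD_cons]
        have := ih2 s x hx
        simpa [hx] using this

lemma bRanges_eq_specLoop (a : List Int) (gap : Int) :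
    pvBRanges a gap = specLoop gap none a := by
  unfold pvBRanges pvStarts pvEnds
  rw [starts_rec gap a gap, ends_rec gap a]
  simpa using (b_main gap a).1

-- ===== VERDICT (by name: the statement is the Claim_ definition above) =====
theorem get_alignment_ranges_spec : Claim_equal_get_alignment_ranges := by
  intro a1 a2 gap _
  unfold Spec_get_alignment_ranges get_alignment_ranges get_alignment_ranges_alt
  rw [aRanges_eq_F, aRanges_eq_F, (main_lemma gap a1).1, (main_lemma gap a2).1,
      bRanges_eq_specLoop, bRanges_eq_specLoop]
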